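-- pv_equiv track=rewrite | github.com/matuspintek-boop/ib111 | sol/04.r5_mystery.py | mystery_function
-- ===== SOURCE A (Python) =====
-- def mystery_function(nums: list[int]) -> list[int]:
--     # Přeskládá a přepočítá prvky pole tak, že nejprve budou
--     # poloviny sudých prvků a poté dvojnásobky lichých prvků.
--     result = [0] * len(nums)
--     i = 0
--     for num in nums:
--         if num % 2 == 0:
--             result[i] = num // 2
--             i += 1
--     for num in nums:
--         if num % 2 != 0:
--             result[i] = num * 2
--             i += 1
--     return result
-- ===== SOURCE B (Python) =====
-- def mystery_function(nums: list[int]) -> list[int]: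
--     # Single pass: partition into two buckets, then concatenate.
--     evens = []
--     odds = []
--     for num in nums:
--         if num % 2 == 0:
--             evens.append(num // 2)
--         else:
--             odds.append(num * 2)
--     return evens + odds
-- ===== Notes on version B (the rewrite author's own statement) =====
-- stated objective: simpler
-- what changed: One pass partitioning into an evens and an odds bucket followed by concatenation, instead of A's two filtering passes writing through a manual index into a preallocated zero array.
import Mathlib
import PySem

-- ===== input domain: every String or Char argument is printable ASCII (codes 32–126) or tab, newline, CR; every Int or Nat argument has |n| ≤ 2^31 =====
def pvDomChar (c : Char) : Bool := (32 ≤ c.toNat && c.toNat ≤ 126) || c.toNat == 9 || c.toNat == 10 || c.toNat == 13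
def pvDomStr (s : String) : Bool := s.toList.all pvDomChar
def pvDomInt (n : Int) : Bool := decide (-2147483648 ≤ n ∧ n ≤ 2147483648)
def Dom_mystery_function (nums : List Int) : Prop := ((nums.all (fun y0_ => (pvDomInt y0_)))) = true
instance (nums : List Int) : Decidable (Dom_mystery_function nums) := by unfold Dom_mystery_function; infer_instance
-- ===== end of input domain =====

-- B builds the evens and odds buckets in one pass and concatenates them, instead of A's
-- two filtering passes writing through a manual index into a preallocated zero array.


-- ===== PORT A =====
-- result = [0]*len(nums); i = 0; two passes writing result[i] and bumping i.
def mystery_function (nums : List Int) : List Int :=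
  let result := List.replicate nums.length (0 : Int)
  let s1 := nums.foldl
    (fun (st : List Int × Nat) num =>
      if PySem.Int.mod num 2 = 0 then (st.1.set st.2 (PySem.Int.floordiv num 2), st.2 + 1) else st)
    (result, 0)
  let s2 := nums.foldl
    (fun (st : List Int × Nat) num =>
      if PySem.Int.mod num 2 ≠ 0 then (st.1.set st.2 (num * 2), st.2 + 1) else st)
    s1
  s2.1

-- ===== PORT B =====
-- one pass: partition into two buckets, then concatenate
def mystery_function_alt (nums : List Int) : List Int :=
  let s := nums.foldl
    (fun (a : List Int × List Int) num =>
      if PySem.Int.mod num 2 = 0 then (a.1 ++ [PySem.Int.floordiv num 2], a.2)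
      else (a.1, a.2 ++ [num * 2]))
    ([], [])
  s.1 ++ s.2

-- ===== PRECONDITION & SPEC =====
def Spec_mystery_function (nums : List Int) (out : List Int) : Prop := out = mystery_function_alt nums
instance (nums : List Int) (out : List Int) : Decidable (Spec_mystery_function nums out) := by unfold Spec_mystery_function; infer_instance

-- ===== CLAIM (what is proved, stated in full; the proofs are below) =====
def Claim_equal_mystery_function : Prop := ∀ (nums : List Int), Dom_mystery_function nums → Spec_mystery_function nums (mystery_function nums)

-- ===== LEMMAS AND PROOFS =====

def evenb (n : Int) : Bool := decide (PySem.Int.mod n 2 = 0)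

-- B's fold appends the mapped evens/odds to the two buckets
theorem b_fold (nums : List Int) : ∀ (e o : List Int),
    nums.foldl
      (fun (a : List Int × List Int) num =>
        if PySem.Int.mod num 2 = 0 then (a.1 ++ [PySem.Int.floordiv num 2], a.2)
        else (a.1, a.2 ++ [num * 2]))
      (e, o)
    = (e ++ (nums.filter evenb).map (fun n => PySem.Int.floordiv n 2),
       o ++ (nums.filter (fun n => !evenb n)).map (fun n => n * 2)) := by
  induction nums with
  | nil => simp
  | cons a t ih =>
    intro e o
    rw [List.foldl_cons]
    by_cases h : PySem.Int.mod a 2 = 0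
    · have hb : evenb a = true := by unfold evenb; exact decide_eq_true h
      rw [if_pos h, ih, List.filter_cons, List.filter_cons, hb]
      simp
    · have hb : evenb a = false := by unfold evenb; exact decide_eq_false h
      rw [if_neg h, ih, List.filter_cons, List.filter_cons, hb]
      simp

theorem set_mid (done : List Int) (x a : Int) (pad : List Int) :
    (done ++ a :: pad).set done.length x = done ++ x :: pad := by
  induction done with
  | nil => rfl
  | cons d ds ih => simp [ih]

-- A's filling loop: starting from done ++ pad at index done.length, it appends the
-- mapped filtered elements after done, consuming the front of pad.
theorem a_fill (q : Int → Bool) (h : Int → Int) (nums : List Int) :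
    ∀ (done pad : List Int), (nums.filter q).length ≤ pad.length →
    nums.foldl
      (fun (st : List Int × Nat) num =>
        if q num = true then (st.1.set st.2 (h num), st.2 + 1) else st)
      (done ++ pad, done.length)
    = (done ++ (nums.filter q).map h ++ pad.drop (nums.filter q).length,
       done.length + (nums.filter q).length) := by
  induction nums with
  | nil => simp
  | cons a t ih =>
    intro done pad hlen
    by_cases hq : q a = true
    · obtain ⟨p0, pt, rfl⟩ : ∃ p0 pt, pad = p0 :: pt := by
        cases pad with
        | nil => simp [hq] at hlen
        | cons p0 pt => exact ⟨p0, pt, rfl⟩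
      have hle : (t.filter q).length ≤ pt.length := by
        simpa [List.filter_cons, hq] using hlen
      have h1 : done ++ h a :: pt = (done ++ [h a]) ++ pt := by simp
      have h2 : done.length + 1 = (done ++ [h a]).length := by simp
      rw [List.foldl_cons, if_pos hq, set_mid, h1, h2, ih _ _ hle]
      simp [hq]
      omega
    · rw [List.foldl_cons, if_neg hq]
      have := ih done pad (by simpa [List.filter_cons, hq] using hlen)
      simp only [List.filter_cons, hq, Bool.false_eq_true, if_false] at *
      exact this

theorem fun_eq1 :
    (fun (st : List Int × Nat) num =>
      if PySem.Int.mod num 2 = 0 then (st.1.set st.2 (PySem.Int.floordiv num 2), st.2 + 1) else st)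
    = (fun (st : List Int × Nat) num =>
      if evenb num = true then (st.1.set st.2 (PySem.Int.floordiv num 2), st.2 + 1) else st) := by
  funext st num
  by_cases h : PySem.Int.mod num 2 = 0
  · rw [if_pos h]; unfold evenb; rw [decide_eq_true h]; simp
  · rw [if_neg h]; unfold evenb; rw [decide_eq_false h]; simp

theorem fun_eq2 :
    (fun (st : List Int × Nat) num =>
      if PySem.Int.mod num 2 ≠ 0 then (st.1.set st.2 (num * 2), st.2 + 1) else st)
    = (fun (st : List Int × Nat) num =>
      if (!evenb num) = true then (st.1.set st.2 (num * 2), st.2 + 1) else st) := by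
  funext st num
  by_cases h : PySem.Int.mod num 2 = 0
  · rw [if_neg (fun hc => hc h)]; unfold evenb; rw [decide_eq_true h]; simp
  · rw [if_pos h]; unfold evenb; rw [decide_eq_false h]; simp

theorem mystery_function_spec : Claim_equal_mystery_function := by
  intro nums _
  show mystery_function nums = mystery_function_alt nums
  unfold mystery_function mystery_function_alt
  have hsum := @List.length_eq_length_filter_add Int nums evenb
  have hce : (nums.filter evenb).length ≤ nums.length := List.length_filter_le _ _
  have hco : (nums.filter (fun n => !evenb n)).length
      = nums.length - (nums.filter evenb).length := by omega
  have h1 := a_fill evenb (fun n => PySem.Int.floordiv n 2) nums []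
      (List.replicate nums.length (0 : Int)) (by simpa using hce)
  simp only [List.nil_append, List.length_nil, Nat.zero_add,
    List.drop_replicate] at h1
  have h2 := a_fill (fun n => !evenb n) (fun n => n * 2) nums
      ((nums.filter evenb).map (fun n => PySem.Int.floordiv n 2))
      (List.replicate (nums.length - (nums.filter evenb).length) (0 : Int))
      (by simp [hco])
  simp only [List.length_map, List.drop_replicate, hco, Nat.sub_self,
    List.replicate_zero, List.append_nil] at h2
  rw [fun_eq1, fun_eq2]
  dsimp only
  rw [h1, h2, b_fold]
  simp
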